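-- pv_equiv track=rewrite | github.com/Vruxak21/HackaMined | python-service/detection/confidence_scorer.py | get_layer_breakdown
-- ===== SOURCE A (Python) =====
-- from typing import Any
--
-- def get_layer_breakdown(
--     results: list[dict[str, Any]]
-- ) -> dict[str, int]:
--     """
--     Return a count-by-detection-source mapping.
--
--     Known sources: "regex", "presidio_spacy", "indic_bert".
--     Results with an unrecognised source are bucketed under "presidio_spacy"
--     (the most common fallback).
--     """
--     breakdown: dict[str, int] = {
--         "regex": 0,
--         "presidio_spacy": 0,
--         "indic_bert": 0,
--     }
--     for result in results:
--         source = result.get("source", "presidio_spacy")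
--         if source in breakdown:
--             breakdown[source] += 1
--         else:
--             breakdown["presidio_spacy"] += 1
--     return breakdown
-- ===== SOURCE B (Python) =====
-- def _count_source(results, s):
--     return sum(1 for r in results if r.get("source") == s)
--
--
-- def get_layer_breakdown(results):
--     regex = _count_source(results, "regex")
--     indic = _count_source(results, "indic_bert")
--     return {
--         "regex": regex,
--         "presidio_spacy": len(results) - regex - indic,
--         "indic_bert": indic,
--     }
-- ===== Notes on version B (the rewrite author's own statement) =====
-- stated objective: simpler
-- what changed: B counts only the two exact buckets ('regex', 'indic_bert') and derives the fallback bucket 'presidio_spacy' as len(results) minus the other two, removing the per-element if/else-with-membership-test and the mutable accumulator dict.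
import Mathlib
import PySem

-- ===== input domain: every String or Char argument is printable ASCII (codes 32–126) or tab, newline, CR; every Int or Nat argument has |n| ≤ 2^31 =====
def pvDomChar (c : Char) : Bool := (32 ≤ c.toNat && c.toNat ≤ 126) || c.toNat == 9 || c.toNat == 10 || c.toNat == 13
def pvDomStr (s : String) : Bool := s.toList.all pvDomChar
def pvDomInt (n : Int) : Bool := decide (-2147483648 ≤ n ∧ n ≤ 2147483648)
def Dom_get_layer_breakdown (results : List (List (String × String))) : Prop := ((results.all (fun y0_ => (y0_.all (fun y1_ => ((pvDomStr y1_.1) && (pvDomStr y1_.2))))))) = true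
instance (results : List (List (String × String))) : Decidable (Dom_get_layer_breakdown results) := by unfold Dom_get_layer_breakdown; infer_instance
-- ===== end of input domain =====

-- B replaces the per-element if/else bucket dispatch by counting the two exact
-- sources and deriving the fallback bucket by complement (objective: simpler).

-- ===== PORT A =====
-- A builds a three-key counter dict and bumps one bucket per element (unknown or
-- missing sources fall into "presidio_spacy"); returned as its items list.
def get_layer_breakdown (results : List (List (String × String))) : List (String × Int) :=
  (results.foldl
    (fun breakdown result =>
      let source := (PySem.Dict.mk result).getD "source" "presidio_spacy"
      if breakdown.contains source then
        breakdown.modify source 0 (· + 1)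
      else
        breakdown.modify "presidio_spacy" 0 (· + 1))
    (PySem.Dict.ofList [("regex", 0), ("presidio_spacy", 0), ("indic_bert", 0)])).items

-- ===== PORT B =====
-- B: count the two exact buckets, derive the fallback bucket by complement.
def countSource (results : List (List (String × String))) (s : String) : Int :=
  results.foldl
    (fun acc r => acc + (if (PySem.Dict.mk r).get? "source" = some s then 1 else 0)) 0

def get_layer_breakdown_alt (results : List (List (String × String))) : List (String × Int) :=
  let regex := countSource results "regex"
  let indic := countSource results "indic_bert"
  [("regex", regex),
   ("presidio_spacy", (results.length : Int) - regex - indic),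
   ("indic_bert", indic)]

-- ===== PRECONDITION & SPEC =====
def Spec_get_layer_breakdown (results : List (List (String × String))) (out : List (String × Int)) : Prop := out = get_layer_breakdown_alt results
instance (results : List (List (String × String))) (out : List (String × Int)) : Decidable (Spec_get_layer_breakdown results out) := by unfold Spec_get_layer_breakdown; infer_instance

-- ===== CLAIM (what is proved, stated in full; the proofs are below) =====
def Claim_equal_get_layer_breakdown : Prop := ∀ (results : List (List (String × String))), Dom_get_layer_breakdown results → Spec_get_layer_breakdown results (get_layer_breakdown results)

-- ===== LEMMAS AND PROOFS =====

def srcOf (r : List (String × String)) : Option String :=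
  (PySem.Dict.mk r).get? "source"

lemma countSource_eq_sum (l : List (List (String × String))) (s : String) :
    countSource l s = (l.map (fun r => if srcOf r = some s then (1 : Int) else 0)).sum := by
  simpa [countSource, srcOf] using
    PySem.List.foldl_add (l := l)
      (g := fun r => if (PySem.Dict.mk r).get? "source" = some s then (1 : Int) else 0) (a := 0)

lemma dictStep (a b c : Int) (k : String) (hk : k = "regex" ∨ k = "presidio_spacy" ∨ k = "indic_bert") :
    (PySem.Dict.mk [("regex", a), ("presidio_spacy", b), ("indic_bert", c)]).modify k 0 (· + 1) =
    PySem.Dict.mk [("regex", a + if k = "regex" then 1 else 0),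
      ("presidio_spacy", b + if k = "presidio_spacy" then 1 else 0),
      ("indic_bert", c + if k = "indic_bert" then 1 else 0)] := by
  rcases hk with h | h | h <;> subst h <;>
    simp [PySem.Dict.modify, PySem.Dict.insert, PySem.Dict.contains, PySem.Dict.getD,
      PySem.Dict.get?, List.replaceF]

lemma foldA (l : List (List (String × String))) (a b c : Int) :
    l.foldl
      (fun breakdown result =>
        let source := (PySem.Dict.mk result).getD "source" "presidio_spacy"
        if breakdown.contains source then
          breakdown.modify source 0 (· + 1)
        else
          breakdown.modify "presidio_spacy" 0 (· + 1))
      (PySem.Dict.mk [("regex", a), ("presidio_spacy", b), ("indic_bert", c)]) =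
    PySem.Dict.mk
      [("regex", a + (l.map (fun r => if srcOf r = some "regex" then (1 : Int) else 0)).sum),
       ("presidio_spacy",
        b + (l.map (fun r =>
          if srcOf r = some "regex" ∨ srcOf r = some "indic_bert" then (0 : Int) else 1)).sum),
       ("indic_bert", c + (l.map (fun r => if srcOf r = some "indic_bert" then (1 : Int) else 0)).sum)] := by
  induction l generalizing a b c with
  | nil => simp
  | cons r l ih =>
    simp only [List.foldl_cons, List.map_cons, List.sum_cons]
    have hcont : ∀ k : String,
        (PySem.Dict.mk [("regex", a), ("presidio_spacy", b), ("indic_bert", c)]).contains k =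
        (k = "regex" ∨ k = "presidio_spacy" ∨ k = "indic_bert" : Bool) := by
      intro k
      by_cases h1 : k = "regex"
      · subst h1; simp [PySem.Dict.contains_mk]
      · by_cases h2 : k = "presidio_spacy"
        · subst h2; simp [PySem.Dict.contains_mk]
        · by_cases h3 : k = "indic_bert"
          · subst h3; simp [PySem.Dict.contains_mk]
          · simp [PySem.Dict.contains_mk, Ne.symm h1, Ne.symm h2, Ne.symm h3, h1, h2, h3]
    rcases h : srcOf r with _ | s
    · simp only [srcOf] at h
      rw [show ((PySem.Dict.mk r).getD "source" "presidio_spacy") = "presidio_spacy" by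
            simp [PySem.Dict.getD_eq_get?_getD, h]]
      rw [hcont]
      simp only [decide_eq_true_eq]
      rw [if_pos (by tauto)]
      rw [dictStep a b c _ (by tauto), ih]
      simp [srcOf]
      (try simp only [PySem.Dict.mk.injEq, List.cons.injEq, Prod.mk.injEq, true_and, and_true]) <;>
          and_intros <;> ring
    · simp only [srcOf] at h
      rw [show ((PySem.Dict.mk r).getD "source" "presidio_spacy") = s by
            simp [PySem.Dict.getD_eq_get?_getD, h]]
      rw [hcont]
      simp only [decide_eq_true_eq]
      by_cases hk : s = "regex" ∨ s = "presidio_spacy" ∨ s = "indic_bert"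
      · rw [if_pos hk, dictStep a b c _ hk, ih]
        rcases hk with h1 | h1 | h1 <;> subst h1 <;> simp [srcOf] <;>
          (try simp only [PySem.Dict.mk.injEq, List.cons.injEq, Prod.mk.injEq, true_and, and_true]) <;>
          and_intros <;> ring
      · rw [if_neg hk, dictStep a b c _ (by tauto), ih]
        push_neg at hk
        simp [srcOf, h, hk.1, hk.2.2]
        (try simp only [PySem.Dict.mk.injEq, List.cons.injEq, Prod.mk.injEq, true_and, and_true]) <;>
          and_intros <;> ring

lemma sum_complement (l : List (List (String × String))) :
    (l.map (fun r =>
      if srcOf r = some "regex" ∨ srcOf r = some "indic_bert" then (0 : Int) else 1)).sum =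
    (l.length : Int)
      - (l.map (fun r => if srcOf r = some "regex" then (1 : Int) else 0)).sum
      - (l.map (fun r => if srcOf r = some "indic_bert" then (1 : Int) else 0)).sum := by
  induction l with
  | nil => simp
  | cons r l ih =>
    simp only [List.map_cons, List.sum_cons, List.length_cons]
    by_cases hr : srcOf r = some "regex" <;> by_cases hi : srcOf r = some "indic_bert" <;>
      simp [hr, hi, ih] <;> ring

-- ===== VERDICT (by name: the statement is the Claim_ definition above) =====
theorem get_layer_breakdown_spec : Claim_equal_get_layer_breakdown := by
  intro results _
  show get_layer_breakdown results = get_layer_breakdown_alt results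
  rw [get_layer_breakdown,
    show PySem.Dict.ofList [("regex", (0:Int)), ("presidio_spacy", 0), ("indic_bert", 0)] =
      PySem.Dict.mk [("regex", 0), ("presidio_spacy", 0), ("indic_bert", 0)] from rfl,
    foldA]
  simp [get_layer_breakdown_alt, countSource_eq_sum, sum_complement]
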